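-- pv_equiv track=rewrite | github.com/danielgabor99/Projects | Artificial Intelligence/P1/C.py | transformToNumber
-- ===== SOURCE A (Python) =====
-- def transformToNumber(l):
--     k=len(l)-1
--     i=1
--     nr=0
--     while(k>-1):
--         nr=nr+i*l[k]
--         if l[k]>9:
--             i=i*100
--         else:
--             i=i*10
--         k=k-1
--     return nr
-- ===== SOURCE B (Python) =====
-- def transformToNumber(l):
--     nr = 0
--     for d in l:
--         nr = nr * (100 if d > 9 else 10) + d
--     return nr
-- ===== Notes on version B (the rewrite author's own statement) =====
-- stated objective: simpler
-- what changed: Replaces the right-to-left loop with a separate accumulating weight by a left-to-right Horner fold maintaining only the running total.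
import Mathlib
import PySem

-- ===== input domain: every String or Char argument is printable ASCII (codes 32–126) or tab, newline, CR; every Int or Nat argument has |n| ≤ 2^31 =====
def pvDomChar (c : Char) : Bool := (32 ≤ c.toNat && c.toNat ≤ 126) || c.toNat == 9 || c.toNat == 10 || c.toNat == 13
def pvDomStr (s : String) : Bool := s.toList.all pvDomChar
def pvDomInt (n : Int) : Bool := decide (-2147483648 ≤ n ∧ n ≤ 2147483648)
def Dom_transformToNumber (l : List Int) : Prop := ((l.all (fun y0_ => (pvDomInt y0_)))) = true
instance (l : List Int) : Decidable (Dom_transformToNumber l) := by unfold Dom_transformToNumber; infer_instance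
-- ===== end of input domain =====

-- B replaces A's right-to-left loop with a separate weight accumulator by a left-to-right Horner fold (simpler; same O(n) cost).
-- ===== PORT A =====
-- while loop of A: k runs len-1 .. 0; state (i, nr); encoded by recursion on k+1
def transformToNumberGo (l : List Int) : Nat → Int → Int → Int
  | 0, _, nr => nr
  | k+1, i, nr =>
      let d := l.getD k 0   -- l[k]; index always in range here, so getD is exact
      transformToNumberGo l k (if d > 9 then i * 100 else i * 10) (nr + i * d)

def transformToNumber (l : List Int) : Int :=
  transformToNumberGo l l.length 1 0

-- ===== PORT B =====
def transformToNumber_alt (l : List Int) : Int :=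
  l.foldl (fun nr d => nr * (if d > 9 then 100 else 10) + d) 0

-- ===== PRECONDITION & SPEC =====
def Spec_transformToNumber (l : List Int) (out : Int) : Prop := out = transformToNumber_alt l
instance (l : List Int) (out : Int) : Decidable (Spec_transformToNumber l out) := by unfold Spec_transformToNumber; infer_instance

-- ===== CLAIM (what is proved, stated in full; the proofs are below) =====
def Claim_equal_transformToNumber : Prop := ∀ (l : List Int), Dom_transformToNumber l → Spec_transformToNumber l (transformToNumber l)

-- ===== LEMMAS AND PROOFS =====

-- ===== VERDICT (by name: the statement is the Claim_ definition above) =====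
theorem transformToNumberGo_eq (l : List Int) : ∀ (k : Nat), k ≤ l.length → ∀ (i nr : Int),
    transformToNumberGo l k i nr =
      nr + i * (l.take k).foldl (fun nr d => nr * (if d > 9 then 100 else 10) + d) 0 := by
  intro k
  induction k with
  | zero => intro _ i nr; simp [transformToNumberGo]
  | succ k ih =>
    intro hk i nr
    have hk' : k < l.length := Nat.lt_of_succ_le hk
    have hd : l.getD k 0 = l[k] := List.getD_eq_getElem l 0 hk'
    have htake : l.take (k+1) = l.take k ++ [l[k]] := List.take_succ_eq_append_getElem hk'
    rw [transformToNumberGo, ih (Nat.le_of_lt hk'), htake, List.foldl_append]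
    simp only [List.foldl, hd]
    split_ifs <;> ring

theorem transformToNumber_spec : Claim_equal_transformToNumber := by
  intro l _
  unfold Spec_transformToNumber transformToNumber transformToNumber_alt
  rw [transformToNumberGo_eq l l.length (le_refl _), List.take_length]
  ring
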